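-- pv_equiv track=rewrite | github.com/odidev/pox | pox/utils.py | selectdict
-- ===== SOURCE A (Python) =====
-- def select(iterable,counter='',minimum=False,reverse=False,all=True):
--     '''select(iterable[,counter,minimum,reverse,all]); Find items in iterable
--     with the minimum/maximum count of the given counter.
--
--     iterable: an iterable of iterables (e.g. a list of lists, list of strings)
--     counter: the item to count (e.g. counter=\'3\' counts occurances of \'3\')
--     minimum: if True, find items with minimum count; if False, find maximum
--     reverse: if True, reverse order of the results; if False, maintain order
--     all: if False, only return the first result
--
--     For example:
--         >>> z = [\'zero\',\'one\',\'two\',\'three\',\'4\',\'five\',\'six\',\'seven\',\'8\',\'9/81\']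
--         >>> select(z, counter=\'e\')
--         [\'three\', \'seven\']
--         >>> select(z, counter=\'e\', minimum=True)
--         [\'two\', \'4\', \'six\', \'8\', \'9/81\']
--         >>>
--         >>> y = [[1,2,3],[4,5,6],[1,3,5]]
--         >>> select(y, counter=3)
--         [[1, 2, 3], [1, 3, 5]]
--         >>> select(y, counter=3, minumim=True, all=False)
--         [4, 5, 6]
--     '''
--     itype = type(iterable)
--     m = []
--     for item in iterable:
--         try: count = item.count(counter)
--         except TypeError: count = 0  # catches '33'.count(3) --> 0
--         except AttributeError: # catches 33.count(3) --> 0 (or 1)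
--             count = 1 if item == counter else 0
--         m.append(count)
--     if reverse:
--         m.reverse()
--         iterable.reverse()
--     if not m:
--         if all == True:
--             return itype([])
--         else:
--             return None
--     if minimum:
--         x = min(m)
--     else: x = max(m)
--     if not all:
--         return iterable[m.index(x)]
--     shortlist = []
--     tmp = []
--     for item in iterable: tmp.append(item)
--     occurances = m.count(x)
--     for i in range(occurances):
--         shortlist.append(tmp.pop(m.index(x)))
--         m.pop(m.index(x))
--     return itype(shortlist)
--
-- def selectdict(dict,counter='',minimum=False,all=True):
--     '''selectdict(dict[,counter,minimum,all]); Return a dict of items with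
--     the minimum/maximum count of the given counter.
--
--     dict: dict with iterables as values (e.g. values are strings or lists)
--     counter: the item to count (e.g. counter=\'3\' counts occurances of \'3\')
--     minimum: if True, find items with minimum count; if False, find maximum
--     all: if False, return a dict with only one item
--
--     For example:
--         >>> z = [\'zero\',\'one\',\'two\',\'three\',\'4\',\'five\',\'six\',\'seven\',\'8\',\'9/81\']
--         >>> z = dict(enumerate(z))
--         >>> selectdict(z, counter=\'e\')
--         {3: \'three\', 7: \'seven\'}
--         >>> selectdict(z, counter=\'e\', minimum=True)
--         {8: \'8\', 9: \'9/81\', 2: \'two\', 4: \'4\', 6: \'six\'}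
--         >>>
--         >>> y = {1: [1,2,3], 2: [4,5,6], 3: [1,3,5]}
--         >>> selectdict(y, counter=3)
--         {1: [1, 2, 3], 3: [1, 3, 5]}
--         >>> selectdict(y, counter=3, minumim=True)
--         {2: [4, 5, 6]}
--     '''
--     keys,values = zip(*dict.items())
--     shortlist = select(values,counter,minimum,all=all)
--     if not all:
--         x = list(values).index(shortlist)
--         return {keys[x]: values[x]}
--     shortdict = {}
--     for i in range(len(values)):
--         if values[i] in shortlist:
--             shortdict.update({keys[i]: values[i]})
--     return shortdict
-- ===== SOURCE B (Python) =====
-- def selectdict(dict, counter='', minimum=False, all=True):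
--     # One pass: bucket items into groups[count]; then pick the min/max count bucket.
--     groups = {}
--     for k, v in dict.items():
--         c = v.count(counter)
--         groups.setdefault(c, {})[k] = v
--     target = min(groups) if minimum else max(groups)  # ValueError on empty dict, like A
--     sel = groups[target]
--     if all:
--         return sel
--     k, v = next(iter(sel.items()))
--     return {k: v}
-- ===== Notes on version B (the rewrite author's own statement) =====
-- stated objective: alternative
-- what changed: B replaces A's count-list plus repeated m.index/pop scans and per-item 'value in shortlist' rescans by a single bucketing pass into a dict mapping count -> sub-dict of items, then picks the min/max bucket directly.
import Mathlib
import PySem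

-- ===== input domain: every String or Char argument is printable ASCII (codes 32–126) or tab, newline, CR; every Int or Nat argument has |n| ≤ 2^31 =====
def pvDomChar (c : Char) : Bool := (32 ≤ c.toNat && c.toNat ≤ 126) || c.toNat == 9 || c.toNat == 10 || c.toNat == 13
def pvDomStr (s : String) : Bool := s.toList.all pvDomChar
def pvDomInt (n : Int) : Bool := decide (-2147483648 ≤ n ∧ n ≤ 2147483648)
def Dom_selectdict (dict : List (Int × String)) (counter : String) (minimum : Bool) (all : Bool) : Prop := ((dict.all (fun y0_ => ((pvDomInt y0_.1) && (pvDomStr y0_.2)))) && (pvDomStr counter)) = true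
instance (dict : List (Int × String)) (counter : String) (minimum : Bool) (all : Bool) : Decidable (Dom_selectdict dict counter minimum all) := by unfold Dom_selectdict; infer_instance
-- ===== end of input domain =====

-- B replaces A's count-list + repeated index/pop scans + membership rescan by one bucketing pass
-- into a count-indexed table of sub-dicts (objective: a different, single-pass algorithm).

-- ===== PORT A =====
-- body of the popping loop 'shortlist.append(tmp.pop(m.index(x))); m.pop(m.index(x))'
def pvPopStep (x : Nat) (st : List String × List String × List Nat) :
    List String × List String × List Nat :=
  match PySem.List.index? st.2.2 x with
  | some j =>
    match PySem.List.pop? st.2.1 (j : Int), PySem.List.pop? st.2.2 (j : Int) with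
    | some (v, tmp'), some (_, m') => (st.1 ++ [v], tmp', m')
    | _, _ => st   -- unreachable: index? found j, so j is in range
  | none => st     -- unreachable: x occurs in m while the loop runs

-- select(values, counter, minimum, all=all) with reverse=False; values are strings, so the
-- try-ladder always takes 'count = item.count(counter)'.  Sum.inl = 'return itype(shortlist)',
-- Sum.inr = 'return iterable[m.index(x)]' (the not-all exit), none = 'return None'.
def pvSelect (iterable : List String) (counter : String) (minimum : Bool) (all : Bool) :
    Option (List String ⊕ String) :=
  let m : List Nat := iterable.foldl (fun acc item => acc ++ [PySem.Str.count item counter]) []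
  if m = [] then (if all then some (Sum.inl []) else none)
  else
    let x : Nat := if minimum then (PySem.List.min? m (fun y => y)).getD 0
                   else (PySem.List.max? m (fun y => y)).getD 0
    if all = false then
      match PySem.List.index? m x with
      | some i => (PySem.List.pyGet? iterable (i : Int)).map Sum.inr
      | none => none   -- unreachable: x ∈ m
    else
      let tmp : List String := iterable.foldl (fun acc item => acc ++ [item]) []
      let occurances : Nat := PySem.List.count m x
      let res := (PySem.List.pyRange 0 (occurances : Int) 1).foldl
        (fun st _ => pvPopStep x st) (([] : List String), tmp, m)
      some (Sum.inl res.1)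

def selectdict (dict : List (Int × String)) (counter : String) (minimum : Bool) (all : Bool) :
    List (Int × String) :=
  if dict = [] then []   -- Python: 'keys,values = zip(*dict.items())' raises ValueError; excluded by Pre_
  else
    let keys : List Int := dict.map (·.1)
    let values : List String := dict.map (·.2)
    match pvSelect values counter minimum all with
    | none => []   -- unreachable: values ≠ []
    | some (Sum.inr shortstr) =>        -- not all: x = values.index(shortlist); {keys[x]: values[x]}
      match PySem.List.index? values shortstr with
      | some x =>
        match keys[x]?, values[x]? with
        | some k, some v => [(k, v)]
        | _, _ => []   -- unreachable: x < len
      | none => []     -- unreachable: shortstr ∈ values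
    | some (Sum.inl shortlist) =>
      let shortdict : PySem.Dict Int String :=
        (PySem.List.pyRange 0 (PySem.List.len values) 1).foldl
          (fun sd i =>
            if shortlist.contains (PySem.List.pyGetD values i "") then
              sd.insert (PySem.List.pyGetD keys i 0) (PySem.List.pyGetD values i "")
            else sd)
          PySem.Dict.empty
      shortdict.items

-- ===== PORT B =====
def selectdict_alt (dict : List (Int × String)) (counter : String) (minimum : Bool) (all : Bool) :
    List (Int × String) :=
  let groups : PySem.Dict Nat (PySem.Dict Int String) :=
    dict.foldl
      (fun g p => g.modify (PySem.Str.count p.2 counter) PySem.Dict.empty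
                    (fun inner => inner.insert p.1 p.2))
      PySem.Dict.empty
  match (if minimum then PySem.List.min? groups.keys (fun y => y)
         else PySem.List.max? groups.keys (fun y => y)) with
  | none => []   -- empty dict: Python 'min(groups)'/'max(groups)' raises ValueError; excluded by Pre_
  | some target =>
    let sel := groups.getD target PySem.Dict.empty
    if all then sel.items
    else
      match sel.items with
      | [] => []        -- unreachable: target is a key of groups
      | p :: _ => [p]   -- next(iter(sel.items()))

-- ===== PRECONDITION & SPEC =====
-- Pre_ excludes the empty dict, on which A's 'zip(*dict.items())' unpack raises ValueError,
-- and association lists with duplicate keys, which do not denote a Python dict.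
def Pre_selectdict (dict : List (Int × String)) (counter : String) (minimum : Bool) (all : Bool) : Prop :=
  dict ≠ [] ∧ (dict.map Prod.fst).Nodup
instance (dict : List (Int × String)) (counter : String) (minimum : Bool) (all : Bool) : Decidable (Pre_selectdict dict counter minimum all) := by unfold Pre_selectdict; infer_instance

def pvWitness_selectdict : (List (Int × String)) × String × Bool × Bool :=
  ([(1, "ab"), (2, "b")], "a", false, true)

def Spec_selectdict (dict : List (Int × String)) (counter : String) (minimum : Bool) (all : Bool) (out : List (Int × String)) : Prop := out = selectdict_alt dict counter minimum all
instance (dict : List (Int × String)) (counter : String) (minimum : Bool) (all : Bool) (out : List (Int × String)) : Decidable (Spec_selectdict dict counter minimum all out) := by unfold Spec_selectdict; infer_instance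

-- ===== CLAIM (what is proved, stated in full; the proofs are below) =====
def Claim_equal_selectdict : Prop := ∀ (dict : List (Int × String)) (counter : String) (minimum : Bool) (all : Bool), Dom_selectdict dict counter minimum all → Pre_selectdict dict counter minimum all → Spec_selectdict dict counter minimum all (selectdict dict counter minimum all)

-- ===== LEMMAS AND PROOFS =====

theorem pv_min_ofList (l : List Nat) (h : l ≠ []) :
    PySem.List.min? (PySem.Set.ofList l) (fun y => y) = PySem.List.min? l (fun y => y) := by
  have h2 : PySem.Set.ofList l ≠ [] := by
    obtain ⟨a, ha⟩ := List.exists_mem_of_ne_nil l h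
    intro he
    have : a ∈ PySem.Set.ofList l := (PySem.Set.mem_ofList l a).mpr ha
    simp [he] at this
  obtain ⟨t1, ht1⟩ := Option.ne_none_iff_exists'.mp
    (fun hc => h ((PySem.List.min?_eq_none_iff l (fun y => y)).mp hc))
  obtain ⟨t2, ht2⟩ := Option.ne_none_iff_exists'.mp
    (fun hc => h2 ((PySem.List.min?_eq_none_iff _ (fun y => y)).mp hc))
  rw [ht1, ht2]
  have e1 : t2 ≤ t1 := PySem.List.min?_isMin ht2 t1 ((PySem.Set.mem_ofList l t1).mpr (PySem.List.min?_mem ht1))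
  have e2 : t1 ≤ t2 := PySem.List.min?_isMin ht1 t2 ((PySem.Set.mem_ofList l t2).mp (PySem.List.min?_mem ht2))
  rw [le_antisymm e1 e2]

theorem pv_max_ofList (l : List Nat) (h : l ≠ []) :
    PySem.List.max? (PySem.Set.ofList l) (fun y => y) = PySem.List.max? l (fun y => y) := by
  have h2 : PySem.Set.ofList l ≠ [] := by
    obtain ⟨a, ha⟩ := List.exists_mem_of_ne_nil l h
    intro he
    have : a ∈ PySem.Set.ofList l := (PySem.Set.mem_ofList l a).mpr ha
    simp [he] at this
  obtain ⟨t1, ht1⟩ := Option.ne_none_iff_exists'.mp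
    (fun hc => h ((PySem.List.max?_eq_none_iff l (fun y => y)).mp hc))
  obtain ⟨t2, ht2⟩ := Option.ne_none_iff_exists'.mp
    (fun hc => h2 ((PySem.List.max?_eq_none_iff _ (fun y => y)).mp hc))
  rw [ht1, ht2]
  have e1 : t1 ≤ t2 := PySem.List.max?_isMax ht2 t1 ((PySem.Set.mem_ofList l t1).mpr (PySem.List.max?_mem ht1))
  have e2 : t2 ≤ t1 := PySem.List.max?_isMax ht1 t2 ((PySem.Set.mem_ofList l t2).mp (PySem.List.max?_mem ht2))
  rw [le_antisymm e2 e1]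

theorem pv_split {α : Type} (cnt : α → Nat) (tmp : List α) (x : Nat) (hx : x ∈ tmp.map cnt) :
    ∃ a v b, tmp = a ++ v :: b ∧ cnt v = x ∧ (∀ u ∈ a, cnt u ≠ x) ∧
      PySem.List.index? (tmp.map cnt) x = some a.length := by
  obtain ⟨j, hj⟩ := Option.isSome_iff_exists.mp ((PySem.List.index?_isSome_iff _ _).mpr hx)
  obtain ⟨pre, suf, hsplit, hlen, hnot⟩ := (PySem.List.index?_eq_some_iff _ _ _).mp hj
  obtain ⟨a, rest, rfl, hma, hrest⟩ := List.map_eq_append_iff.mp hsplit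
  obtain ⟨v, b, rfl, hv, hmb⟩ := List.map_eq_cons_iff.mp hrest
  refine ⟨a, v, b, rfl, hv, ?_, ?_⟩
  · intro u hu hc
    exact hnot (hma ▸ (hc ▸ List.mem_map_of_mem hu))
  · rw [hj, ← hlen, ← hma, List.length_map]
    

theorem pv_pop_mid {α : Type} (a : List α) (v : α) (b : List α) :
    PySem.List.pop? (a ++ v :: b) ((a.length : Nat) : Int) = some (v, a ++ b) := by
  rw [PySem.List.pop?_natCast (a ++ v :: b) a.length (by simp)]
  have he : (a ++ v :: b).eraseIdx a.length = a ++ b := by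
    induction a with
    | nil => simp
    | cons h t ih => simpa using ih
  simp [he]

theorem pv_pop_loop (cnt : String → Nat) (x : Nat) : ∀ (n : Nat) (tmp sl : List String),
    (tmp.map cnt).count x = n →
    ((pvPopStep x)^[n] (sl, tmp, tmp.map cnt)).1 = sl ++ tmp.filter (fun v => cnt v == x) := by
  intro n
  induction n with
  | zero =>
    intro tmp sl hc
    have hnx : x ∉ tmp.map cnt := List.count_eq_zero.mp hc
    have : tmp.filter (fun v => cnt v == x) = [] := by
      rw [List.filter_eq_nil_iff]
      intro u hu hb
      exact hnx (List.mem_map.mpr ⟨u, hu, (beq_iff_eq).mp hb⟩)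
    simp [this]
  | succ k ih =>
    intro tmp sl hc
    have hx : x ∈ tmp.map cnt := List.count_pos_iff.mp (by omega)
    obtain ⟨a, v, b, rfl, hv, ha, hidx⟩ := pv_split cnt tmp x hx
    have hstep : pvPopStep x (sl, a ++ v :: b, (a ++ v :: b).map cnt)
        = (sl ++ [v], a ++ b, (a ++ b).map cnt) := by
      unfold pvPopStep
      simp only [hidx]
      have h1 := pv_pop_mid a v b
      have h2 : PySem.List.pop? (a.map cnt ++ cnt v :: b.map cnt) ((a.length : Nat) : Int)
          = some (cnt v, a.map cnt ++ b.map cnt) := by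
        simpa using pv_pop_mid (a.map cnt) (cnt v) (b.map cnt)
      simp [h1, h2]
    have hcount : ((a ++ b).map cnt).count x = k := by
      have hca : (a.map cnt).count x = 0 := List.count_eq_zero.mpr (by
        intro hm
        obtain ⟨u, hu, hux⟩ := List.mem_map.mp hm
        exact ha u hu hux)
      have : ((a ++ v :: b).map cnt).count x = (a.map cnt).count x + 1 + ((b.map cnt).count x) := by
        simp [List.count_append, hv]
        omega
      rw [this, hca] at hc
      simp [List.count_append]
      omega
    rw [Function.iterate_succ_apply, hstep, ih _ _ hcount]
    have hfa : a.filter (fun v => cnt v == x) = [] := by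
      rw [List.filter_eq_nil_iff]
      intro u hu hb
      exact ha u hu ((beq_iff_eq).mp hb)
    simp [List.filter_append, hfa, hv]

theorem pv_fold_range {sigma : Type} (l : List (Int × String)) (f : sigma → Int → String → sigma)
    (init : sigma) :
    (PySem.List.pyRange 0 (PySem.List.len (l.map Prod.snd)) 1).foldl
      (fun sd i => f sd (PySem.List.pyGetD (l.map Prod.fst) i 0)
                        (PySem.List.pyGetD (l.map Prod.snd) i "")) init
    = l.foldl (fun sd q => f sd q.1 q.2) init := by
  have h1 : ∀ i, PySem.List.pyGetD (l.map Prod.fst) i (0 : Int)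
      = (PySem.List.pyGetD l i ((0 : Int), "")).1 := fun i =>
    PySem.List.pyGetD_map Prod.fst l i ((0 : Int), "")
  have h2 : ∀ i, PySem.List.pyGetD (l.map Prod.snd) i ""
      = (PySem.List.pyGetD l i ((0 : Int), "")).2 := fun i =>
    PySem.List.pyGetD_map Prod.snd l i ((0 : Int), "")
  have hlen : PySem.List.len (l.map Prod.snd) = PySem.List.len l := by
    simp [PySem.List.len_eq]
  simp only [h1, h2, hlen]
  simpa using PySem.List.foldl_pyRange_pyGetD l ((0 : Int), "")
    (fun sd q => f sd q.1 q.2) init (le_refl 0)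

theorem pv_items_filter (p : Int × String → Bool) : ∀ (l : List (Int × String))
    (sd : PySem.Dict Int String), (l.map Prod.fst).Nodup → (∀ q ∈ l, sd.contains q.1 = false) →
    (l.foldl (fun sd q => if p q then sd.insert q.1 q.2 else sd) sd).items
      = sd.items ++ l.filter p := by
  intro l
  induction l with
  | nil => intro sd _ _; simp
  | cons q t ih =>
    intro sd hnd hfresh
    have hndt : (t.map Prod.fst).Nodup := (List.nodup_cons.mp (by simpa using hnd)).2
    have hq1 : q.1 ∉ t.map Prod.fst := (List.nodup_cons.mp (by simpa using hnd)).1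
    by_cases hp : p q
    · have hfr : ∀ r ∈ t, (sd.insert q.1 q.2).contains r.1 = false := by
        intro r hr
        rw [PySem.Dict.contains_insert]
        have : r.1 ≠ q.1 := fun he => hq1 (he ▸ List.mem_map_of_mem hr)
        simp [this, hfresh r (List.mem_cons_of_mem q hr)]
      have := ih (sd.insert q.1 q.2) hndt hfr
      simp only [List.foldl_cons, hp, if_pos]
      rw [this, PySem.Dict.items_insert_of_not_contains sd q.2 (hfresh q (List.mem_cons_self))]
      simp [hp]
    · have := ih sd hndt (fun r hr => hfresh r (List.mem_cons_of_mem q hr))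
      simp only [List.foldl_cons, if_neg hp]
      rw [this]
      simp [hp]

theorem pv_groups (counter : String) : ∀ (l : List (Int × String))
    (g : PySem.Dict Nat (PySem.Dict Int String)) (c : Nat),
    (l.foldl (fun g p => g.modify (PySem.Str.count p.2 counter) PySem.Dict.empty
        (fun inner => inner.insert p.1 p.2)) g).getD c PySem.Dict.empty
    = (l.filter (fun p => PySem.Str.count p.2 counter == c)).foldl
        (fun inner p => inner.insert p.1 p.2) (g.getD c PySem.Dict.empty) := by
  intro l
  induction l with
  | nil => intro g c; simp
  | cons q t ih =>
    intro g c
    simp only [List.foldl_cons]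
    rw [ih]
    by_cases hc : PySem.Str.count q.2 counter = c
    · rw [List.filter_cons_of_pos (by simp only [beq_iff_eq]; exact hc),
        PySem.Dict.getD_modify, if_pos hc.symm, hc]
      simp only [List.foldl_cons]
    · rw [List.filter_cons_of_neg (by simp only [beq_iff_eq]; exact hc),
        PySem.Dict.getD_modify, if_neg (fun h => hc h.symm)]

theorem pv_get_mid {α : Type} (a : List α) (v : α) (b : List α) :
    (a ++ v :: b)[a.length]? = some v := by
  induction a with
  | nil => rfl
  | cons h t ih => simpa using ih

theorem pv_foldl_ignore {σ α : Type} (f : σ → σ) : ∀ (l : List α) (s : σ),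
    l.foldl (fun st _ => f st) s = f^[l.length] s := by
  intro l
  induction l with
  | nil => intro s; rfl
  | cons hd tl ih => intro s; simpa [Function.iterate_succ_apply] using ih (f s)
theorem pv_B_eq (dict : List (Int × String)) (counter : String) (minimum all : Bool)
    (hnd : (dict.map Prod.fst).Nodup) (x : Nat)
    (hx : (if minimum then
            PySem.List.min? (dict.map (fun p => PySem.Str.count p.2 counter)) (fun y => y)
          else
            PySem.List.max? (dict.map (fun p => PySem.Str.count p.2 counter)) (fun y => y))
          = some x) :
    selectdict_alt dict counter minimum all =
      if all then dict.filter (fun p => PySem.Str.count p.2 counter == x)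
      else (dict.filter (fun p => PySem.Str.count p.2 counter == x)).take 1 := by
  have hms : dict.map (fun p => PySem.Str.count p.2 counter) ≠ [] := by
    intro he
    have hdict : dict = [] := List.map_eq_nil_iff.mp he
    subst hdict
    cases minimum <;> simp only [List.map_nil] at hx <;>
      rw [(by rfl : (PySem.List.min? ([] : List Nat) (fun y => y)) = none)] at * <;>
      rw [(by rfl : (PySem.List.max? ([] : List Nat) (fun y => y)) = none)] at * <;>
      cases hx
  have hkeys : (dict.foldl
      (fun g p => g.modify (PySem.Str.count p.2 counter) PySem.Dict.empty
        (fun inner => inner.insert p.1 p.2)) PySem.Dict.empty).keys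
      = PySem.Set.ofList (dict.map (fun p => PySem.Str.count p.2 counter)) := by
    rw [PySem.Dict.keys_foldl_modify_key dict (fun p => PySem.Str.count p.2 counter)
      PySem.Dict.empty (fun _ p => fun inner => inner.insert p.1 p.2) PySem.Dict.empty]
    rw [PySem.Dict.keys_empty, PySem.Set.update_nil_left]
  have hsel : ((dict.foldl
      (fun g p => g.modify (PySem.Str.count p.2 counter) PySem.Dict.empty
        (fun inner => inner.insert p.1 p.2)) PySem.Dict.empty).getD x PySem.Dict.empty).items
      = dict.filter (fun p => PySem.Str.count p.2 counter == x) := by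
    rw [pv_groups counter dict PySem.Dict.empty x, PySem.Dict.getD_empty]
    rw [PySem.Dict.items_foldl_insert_fresh _ Prod.fst Prod.snd _
      (fun a _ => PySem.Dict.contains_empty a.1)
      (hnd.sublist (List.Sublist.map Prod.fst List.filter_sublist))]
    simp [PySem.Dict.empty]
  unfold selectdict_alt
  simp only []
  rw [hkeys]
  simp only [PySem.Str.count_eq] at hx hsel hms ⊢
  cases minimum
  · rw [if_neg (by simp)] at hx
    rw [pv_max_ofList _ hms, hx]
    cases all
    · simp only [Bool.false_eq_true, if_false]
      simp [hsel]
      generalize List.filter _ dict = res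
      cases res <;> simp
    · simpa [hsel] using rfl
  · rw [if_pos rfl] at hx
    rw [pv_min_ofList _ hms, hx]
    cases all
    · simp only [Bool.false_eq_true, if_false]
      simp [hsel]
      generalize List.filter _ dict = res
      cases res <;> simp
    · simpa [hsel] using rfl
theorem pv_A_sel_all (values : List String) (counter : String) (minimum : Bool)
    (hne : values ≠ []) (x : Nat)
    (hx : (if minimum then
            PySem.List.min? (values.map (fun v => PySem.Str.count v counter)) (fun y => y)
          else
            PySem.List.max? (values.map (fun v => PySem.Str.count v counter)) (fun y => y))
          = some x) :
    pvSelect values counter minimum true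
      = some (Sum.inl (values.filter (fun v => PySem.Str.count v counter == x))) := by
  unfold pvSelect
  simp only [PySem.List.foldl_append_singleton_eq_map, List.nil_append, List.map_id']
  rw [if_neg (by simpa using hne)]
  have hxa : (if minimum then
      (PySem.List.min? (values.map (fun v => PySem.Str.count v counter)) (fun y => y)).getD 0
    else
      (PySem.List.max? (values.map (fun v => PySem.Str.count v counter)) (fun y => y)).getD 0)
      = x := by
    cases minimum
    · rw [if_neg (by simp)] at hx
      simp only [PySem.Str.count_eq] at hx ⊢
      rw [hx]
      rfl
    · rw [if_pos rfl] at hx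
      simp only [PySem.Str.count_eq] at hx ⊢
      rw [hx]
      rfl
  rw [if_neg (by simp)]
  rw [hxa]
  rw [pv_foldl_ignore (pvPopStep x)]
  have hlen : (PySem.List.pyRange 0
      ((PySem.List.count (values.map (fun v => PySem.Str.count v counter)) x : Nat) : Int) 1).length
      = (values.map (fun v => PySem.Str.count v counter)).count x := by
    rw [PySem.List.pyRange_zero_natCast]
    simp [PySem.List.count_eq]
  rw [hlen, pv_pop_loop (fun v => PySem.Str.count v counter) x _ values []
    rfl]
  simp

theorem pv_A_sel_one (values : List String) (counter : String) (minimum : Bool)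
    (hne : values ≠ []) (x : Nat) (a : List String) (v : String) (b : List String)
    (hsplit : values = a ++ v :: b)
    (hidx : PySem.List.index? (values.map (fun v => PySem.Str.count v counter)) x = some a.length)
    (hx : (if minimum then
            PySem.List.min? (values.map (fun v => PySem.Str.count v counter)) (fun y => y)
          else
            PySem.List.max? (values.map (fun v => PySem.Str.count v counter)) (fun y => y))
          = some x) :
    pvSelect values counter minimum false = some (Sum.inr v) := by
  unfold pvSelect
  simp only [PySem.List.foldl_append_singleton_eq_map, List.nil_append, List.map_id']
  rw [if_neg (by simpa using hne)]
  have hxa : (if minimum then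
      (PySem.List.min? (values.map (fun v => PySem.Str.count v counter)) (fun y => y)).getD 0
    else
      (PySem.List.max? (values.map (fun v => PySem.Str.count v counter)) (fun y => y)).getD 0)
      = x := by
    cases minimum
    · rw [if_neg (by simp)] at hx
      simp only [PySem.Str.count_eq] at hx ⊢
      rw [hx]
      rfl
    · rw [if_pos rfl] at hx
      simp only [PySem.Str.count_eq] at hx ⊢
      rw [hx]
      rfl
  rw [if_pos trivial, hxa, hidx]
  have hget : PySem.List.pyGet? values ((a.length : Nat) : Int) = some v := by
    rw [PySem.List.pyGet?_natCast, hsplit, pv_get_mid]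
  show Option.map Sum.inr (PySem.List.pyGet? values ((a.length : Nat) : Int)) = some (Sum.inr v)
  rw [hget]
  rfl

theorem pv_A_eq (dict : List (Int × String)) (counter : String) (minimum all : Bool)
    (hne : dict ≠ []) (hnd : (dict.map Prod.fst).Nodup) (x : Nat)
    (hx : (if minimum then
            PySem.List.min? (dict.map (fun p => PySem.Str.count p.2 counter)) (fun y => y)
          else
            PySem.List.max? (dict.map (fun p => PySem.Str.count p.2 counter)) (fun y => y))
          = some x) :
    selectdict dict counter minimum all =
      if all then dict.filter (fun p => PySem.Str.count p.2 counter == x)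
      else (dict.filter (fun p => PySem.Str.count p.2 counter == x)).take 1 := by
  have hvm : (dict.map (fun p => p.2)).map (fun v => PySem.Str.count v counter)
      = dict.map (fun p => PySem.Str.count p.2 counter) := by
    rw [List.map_map]; rfl
  have hvne : dict.map (fun p => p.2) ≠ [] := by simpa using hne
  have hxv : (if minimum then
      PySem.List.min? ((dict.map (fun p => p.2)).map (fun v => PySem.Str.count v counter)) (fun y => y)
    else
      PySem.List.max? ((dict.map (fun p => p.2)).map (fun v => PySem.Str.count v counter)) (fun y => y))
      = some x := by rw [hvm]; exact hx
  unfold selectdict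
  rw [if_neg hne]
  simp only []
  cases all
  · -- all = false: the Sum.inr exit
    have hxm : x ∈ dict.map (fun p => PySem.Str.count p.2 counter) := by
      cases minimum
      · rw [if_neg (by simp)] at hx; exact PySem.List.max?_mem hx
      · rw [if_pos rfl] at hx; exact PySem.List.min?_mem hx
    obtain ⟨dA, p0, dB, hsp, hcx, hna, hidx⟩ :=
      pv_split (fun p => PySem.Str.count p.2 counter) dict x hxm
    have hsplitv : dict.map (fun p => p.2)
        = dA.map (fun p => p.2) ++ p0.2 :: dB.map (fun p => p.2) := by
      rw [hsp]; simp
    have hidxv : PySem.List.index?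
        ((dict.map (fun p => p.2)).map (fun v => PySem.Str.count v counter)) x
        = some (dA.map (fun p : Int × String => p.2)).length := by
      rw [hvm, hidx]; simp
    rw [pv_A_sel_one (dict.map (fun p => p.2)) counter minimum hvne x
      (dA.map (fun p => p.2)) p0.2 (dB.map (fun p => p.2)) hsplitv hidxv hxv]
    conv_lhs => whnf
    have hnm : p0.2 ∉ dA.map (fun p : Int × String => p.2) := by
      intro hm
      obtain ⟨r, hr, hr2⟩ := List.mem_map.mp hm
      exact hna r hr (by rw [hr2, hcx])
    have hiv : PySem.List.index? (dict.map (fun p => p.2)) p0.2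
        = some (dA.map (fun p : Int × String => p.2)).length :=
      (PySem.List.index?_eq_some_iff _ _ _).mpr
        ⟨dA.map (fun p => p.2), dB.map (fun p => p.2), hsplitv, rfl, hnm⟩
    rw [hiv]
    conv_lhs => whnf
    have hkget : (dict.map (fun p => p.1))[(dA.map (fun p : Int × String => p.2)).length]?
        = some p0.1 := by
      rw [show dict.map (fun p => p.1)
          = dA.map (fun p => p.1) ++ p0.1 :: dB.map (fun p => p.1) from by rw [hsp]; simp]
      simpa using pv_get_mid (dA.map (fun p : Int × String => p.1)) p0.1
        (dB.map (fun p => p.1))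
    have hvget : (dict.map (fun p => p.2))[(dA.map (fun p : Int × String => p.2)).length]?
        = some p0.2 := by
      rw [hsplitv]
      exact pv_get_mid _ _ _
    rw [hkget, hvget]
    conv_lhs => whnf
    have hfil : dict.filter (fun p => PySem.Str.count p.2 counter == x)
        = p0 :: dB.filter (fun p => PySem.Str.count p.2 counter == x) := by
      rw [hsp, List.filter_append,
        List.filter_eq_nil_iff.mpr (fun u hu => by simpa using hna u hu),
        List.filter_cons_of_pos (by simpa using hcx)]
      simp
    rw [hfil]
    simp
  · -- all = true
    rw [pv_A_sel_all (dict.map (fun p => p.2)) counter minimum hvne x hxv]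
    conv_lhs => whnf
    have hrange := pv_fold_range dict
      (fun sd k v => if ((dict.map (fun p => p.2)).filter
          (fun v => PySem.Str.count v counter == x)).contains v then sd.insert k v else sd)
      PySem.Dict.empty
    rw [hrange]
    show (List.foldl (fun sd q =>
        if ((dict.map (fun p => p.2)).filter
            (fun v => PySem.Str.count v counter == x)).contains q.2 then
          sd.insert q.1 q.2 else sd) PySem.Dict.empty dict).items = _
    rw [pv_items_filter (fun q => ((dict.map (fun p => p.2)).filter
          (fun v => PySem.Str.count v counter == x)).contains q.2) dict PySem.Dict.empty hnd
      (fun q _ => PySem.Dict.contains_empty q.1)]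
    have hcong : dict.filter (fun q => ((dict.map (fun p => p.2)).filter
          (fun v => PySem.Str.count v counter == x)).contains q.2)
        = dict.filter (fun p => PySem.Str.count p.2 counter == x) := by
      apply List.filter_congr
      intro q hq
      by_cases h : PySem.Str.count q.2 counter = x
      · have hmem : q.2 ∈ (dict.map (fun p => p.2)).filter
            (fun v => PySem.Str.count v counter == x) :=
          List.mem_filter.mpr ⟨List.mem_map_of_mem hq, by simpa using h⟩
        simp only [PySem.Str.count_eq] at hmem h
        simp [List.contains_eq_mem, hmem, h]
      · have hmem : q.2 ∉ (dict.map (fun p => p.2)).filter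
            (fun v => PySem.Str.count v counter == x) := by
          intro hm
          exact h (by simpa using (List.mem_filter.mp hm).2)
        simp only [PySem.Str.count_eq] at hmem h
        simp [List.contains_eq_mem, hmem, h]
    rw [hcong]
    simp [PySem.Dict.empty]

theorem pv_main : ∀ (dict : List (Int × String)) (counter : String) (minimum : Bool) (all : Bool),
    dict ≠ [] → (dict.map Prod.fst).Nodup →
    selectdict dict counter minimum all = selectdict_alt dict counter minimum all := by
  intro dict counter minimum all hne hnd
  have hms : dict.map (fun p => PySem.Str.count p.2 counter) ≠ [] := by simpa using hne
  obtain ⟨x, hx⟩ : ∃ x, (if minimum then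
      PySem.List.min? (dict.map (fun p => PySem.Str.count p.2 counter)) (fun y => y)
    else
      PySem.List.max? (dict.map (fun p => PySem.Str.count p.2 counter)) (fun y => y))
      = some x := by
    cases minimum
    · rw [if_neg (by simp)]
      exact Option.ne_none_iff_exists'.mp
        (fun hc => hms ((PySem.List.max?_eq_none_iff _ _).mp hc))
    · rw [if_pos rfl]
      exact Option.ne_none_iff_exists'.mp
        (fun hc => hms ((PySem.List.min?_eq_none_iff _ _).mp hc))
  rw [pv_A_eq dict counter minimum all hne hnd x hx,
    pv_B_eq dict counter minimum all hnd x hx]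

-- ===== VERDICT (by name: the statement is the Claim_ definition above) =====
theorem selectdict_spec : Claim_equal_selectdict := by
  intro dict counter minimum all _hdom hpre
  unfold Spec_selectdict
  exact pv_main dict counter minimum all hpre.1 hpre.2
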